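-- pv_equiv track=rewrite | github.com/adammsafi/ta_lab2 | tests/test_bar_ohlc_correctness.py | _normalize_db_url
-- ===== SOURCE A (Python) =====
-- def _normalize_db_url(url: str) -> str:
--     """
--     psycopg2/psycopg want a plain Postgres URI (postgresql://.),
--     but users often provide SQLAlchemy URLs like postgresql+psycopg2://.
--     """
--     if not url:
--         return url
--
--     replacements = (
--         "postgresql+psycopg2://",
--         "postgresql+psycopg://",
--         "postgresql+psycopg3://",
--         "postgres+psycopg2://",
--         "postgres+psycopg://",
--         "postgres+psycopg3://",
--     )
--     for prefix in replacements:
--         if url.startswith(prefix):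
--             return "postgresql://" + url[len(prefix) :]
--     return url
-- ===== SOURCE B (Python) =====
-- _SCHEMES = {
--     "postgresql+psycopg2",
--     "postgresql+psycopg",
--     "postgresql+psycopg3",
--     "postgres+psycopg2",
--     "postgres+psycopg",
--     "postgres+psycopg3",
-- }
--
--
-- def _normalize_db_url(url: str) -> str:
--     scheme, sep, rest = url.partition("://")
--     if sep and scheme in _SCHEMES:
--         return "postgresql://" + rest
--     return url
-- ===== Notes on version B (the rewrite author's own statement) =====
-- stated objective: idiomatic
-- what changed: Replaces the six-way startswith prefix loop with a single partition at the first '://' plus a set-membership test on the scheme name.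
import Mathlib
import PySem

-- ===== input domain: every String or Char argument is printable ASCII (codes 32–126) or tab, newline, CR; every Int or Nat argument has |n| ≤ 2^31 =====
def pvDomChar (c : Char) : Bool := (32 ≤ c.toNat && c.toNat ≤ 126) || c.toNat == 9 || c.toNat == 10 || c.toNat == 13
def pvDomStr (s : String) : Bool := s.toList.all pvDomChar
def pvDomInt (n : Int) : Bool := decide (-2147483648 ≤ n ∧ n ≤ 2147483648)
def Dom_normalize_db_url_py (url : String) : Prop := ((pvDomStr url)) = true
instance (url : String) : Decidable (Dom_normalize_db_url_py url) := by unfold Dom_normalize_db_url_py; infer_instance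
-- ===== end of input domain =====

-- B replaces the six-way startswith prefix loop by one partition at the first "://" plus a
-- set-membership test on the scheme name (more idiomatic; same exact behaviour).


-- ===== PORT A =====
def pvPrefixesA : List String :=
  ["postgresql+psycopg2://", "postgresql+psycopg://", "postgresql+psycopg3://",
   "postgres+psycopg2://", "postgres+psycopg://", "postgres+psycopg3://"]

-- the 'for prefix in replacements' loop, returning at the first matching prefix
def pvLoopA (url : String) : List String → String
  | [] => url
  | p :: rest =>
    if PySem.Str.startswith url p then
      "postgresql://" ++ PySem.Str.slice url (some (PySem.Str.len p : Int)) none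
    else pvLoopA url rest

def normalize_db_url_py (url : String) : String :=
  if url = "" then url else pvLoopA url pvPrefixesA

-- ===== PORT B =====
def pvSchemes : PySem.Set String :=
  PySem.Set.ofList
    ["postgresql+psycopg2", "postgresql+psycopg", "postgresql+psycopg3",
     "postgres+psycopg2", "postgres+psycopg", "postgres+psycopg3"]

-- url.partition("://") ported by hand via the first occurrence (exact: str.partition splits
-- at s.find(sep); find = -1 means sep = "" which is falsy, so url is returned unchanged)
def normalize_db_url_py_alt (url : String) : String :=
  let i := PySem.Str.find url "://"
  if i = -1 then url
  else
    let scheme := PySem.Str.slice url none (some i)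
    let rest := PySem.Str.slice url (some (i + 3)) none
    if PySem.Set.contains pvSchemes scheme then "postgresql://" ++ rest
    else url

-- ===== PRECONDITION & SPEC =====
def Spec_normalize_db_url_py (url : String) (out : String) : Prop := out = normalize_db_url_py_alt url
instance (url : String) (out : String) : Decidable (Spec_normalize_db_url_py url out) := by unfold Spec_normalize_db_url_py; infer_instance

-- ===== CLAIM (what is proved, stated in full; the proofs are below) =====
def Claim_equal_normalize_db_url_py : Prop := ∀ (url : String), Dom_normalize_db_url_py url → Spec_normalize_db_url_py url (normalize_db_url_py url)

-- ===== LEMMAS AND PROOFS =====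

-- the first "://" in c ++ "://" ++ z sits exactly at c.length when c itself has no ':'
lemma pvFind_sep (c z : List Char) (h : ':' ∉ c) :
    PySem.Chars.find (c ++ ':' :: '/' :: '/' :: z) [':', '/', '/'] = (c.length : Int) := by
  have hinf : [':', '/', '/'] <:+: (c ++ ':' :: '/' :: '/' :: z) :=
    ⟨c, z, by simp⟩
  have hnn : 0 ≤ PySem.Chars.find (c ++ ':' :: '/' :: '/' :: z) [':', '/', '/'] :=
    (PySem.Chars.find_nonneg_iff _ _).mpr hinf
  obtain ⟨hpref, hmin⟩ := PySem.Chars.find_spec (s := c ++ ':' :: '/' :: '/' :: z) (sub := [':', '/', '/']) hnn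
  set f := (PySem.Chars.find (c ++ ':' :: '/' :: '/' :: z) [':', '/', '/']).toNat with hfdef
  have h1 : ¬ c.length < f := by
    intro hlt
    exact hmin c.length hlt (by simp)
  have h2 : ¬ f < c.length := by
    intro hlt
    have hd : (c ++ ':' :: '/' :: '/' :: z).drop f = c.drop f ++ ':' :: '/' :: '/' :: z :=
      List.drop_append_of_le_length (le_of_lt hlt)
    obtain ⟨a, t, hdc⟩ : ∃ a t, c.drop f = a :: t := by
      cases hcd : c.drop f with
      | nil =>
        exfalso
        have := congrArg List.length hcd
        simp at this
        omega
      | cons a t => exact ⟨a, t, rfl⟩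
    have ha : a ∈ c := by
      apply List.mem_of_mem_drop (i := f)
      rw [hdc]
      exact List.mem_cons_self
    rw [hd, hdc] at hpref
    have hc : ':' = a := (List.cons_prefix_cons.mp hpref).1
    exact h (hc ▸ ha)
  have hfe : f = c.length := by omega
  omega

lemma pvStartswith_of_scheme (url s : String) (f : Nat)
    (htake : url.toList.take f = s.toList)
    (hdrop : [':', '/', '/'] <+: url.toList.drop f) :
    PySem.Str.startswith url (s ++ "://") = true := by
  obtain ⟨z, hz⟩ := hdrop
  have hu : url.toList = s.toList ++ ':' :: '/' :: '/' :: z := by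
    conv_lhs => rw [← List.take_append_drop f url.toList]
    rw [htake, ← hz]
    simp
  rw [PySem.Str.startswith_eq]
  rw [PySem.Chars.startswith_iff]
  exact ⟨z, by simp [hu]⟩

-- B's value when url splits as scheme ++ "://" ++ rest with a known scheme
lemma pvAlt_of_split (url s : String) (z : List Char)
    (hu : url.toList = s.toList ++ ':' :: '/' :: '/' :: z)
    (hc : ':' ∉ s.toList)
    (hmem : PySem.Set.contains pvSchemes s = true) :
    normalize_db_url_py_alt url =
      "postgresql://" ++ PySem.Str.slice url (some ((s.toList.length : Int) + 3)) none := by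
  have hfind : PySem.Str.find url "://" = (s.toList.length : Int) := by
    rw [show PySem.Str.find url "://" = PySem.Chars.find url.toList [':', '/', '/'] by
          simp [PySem.Str.find_eq]]
    rw [hu]; exact pvFind_sep _ _ hc
  have hne : ((s.toList.length : Int)) ≠ -1 := by omega
  have hscheme : PySem.Str.slice url none (some (s.toList.length : Int)) = s := by
    apply String.ext  -- toList injective
    rw [PySem.Str.toList_slice]
    simp [PySem.List.slice_to_natCast, hu, List.take_left']
  unfold normalize_db_url_py_alt
  simp only [hfind, if_neg hne, hscheme, hmem, if_pos]

lemma pvSchemes_cases (x : String) (h : PySem.Set.contains pvSchemes x = true) :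
    x = "postgresql+psycopg2" ∨ x = "postgresql+psycopg" ∨ x = "postgresql+psycopg3" ∨
    x = "postgres+psycopg2" ∨ x = "postgres+psycopg" ∨ x = "postgres+psycopg3" := by
  simp [pvSchemes, PySem.Set.contains, PySem.Set.ofList, PySem.Set.add] at h
  tauto

-- B's value when url starts with scheme ++ "://"
lemma pvPosB (url s : String) (hc : ':' ∉ s.toList)
    (hmem : PySem.Set.contains pvSchemes s = true)
    (hsw : PySem.Str.startswith url (s ++ "://") = true) :
    normalize_db_url_py_alt url =
      "postgresql://" ++ PySem.Str.slice url (some ((s.toList.length : Int) + 3)) none := by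
  rw [PySem.Str.startswith_eq, PySem.Chars.startswith_iff] at hsw
  obtain ⟨z, hz⟩ := hsw
  have hu : url.toList = s.toList ++ ':' :: '/' :: '/' :: z := by
    rw [← hz]; simp
  exact pvAlt_of_split url s z hu hc hmem

theorem pvMain (url : String) : normalize_db_url_py url = normalize_db_url_py_alt url := by
  by_cases h1 : PySem.Str.startswith url "postgresql+psycopg2://" = true
  · have hne : url ≠ "" := by
      intro he; rw [he] at h1; revert h1; decide
    rw [pvPosB url "postgresql+psycopg2" (by decide) (by decide)
          (by rw [show ("postgresql+psycopg2" ++ "://" : String) = "postgresql+psycopg2://" from rfl]; exact h1)]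
    unfold normalize_db_url_py
    rw [if_neg hne]
    simp only [pvPrefixesA, pvLoopA, if_pos h1]
    congr 2
  · rw [Bool.not_eq_true] at h1
    by_cases h2 : PySem.Str.startswith url "postgresql+psycopg://" = true
    · have hne : url ≠ "" := by
        intro he; rw [he] at h2; revert h2; decide
      rw [pvPosB url "postgresql+psycopg" (by decide) (by decide)
            (by rw [show ("postgresql+psycopg" ++ "://" : String) = "postgresql+psycopg://" from rfl]; exact h2)]
      unfold normalize_db_url_py
      rw [if_neg hne]
      simp only [pvPrefixesA, pvLoopA, h1, h2, Bool.false_eq_true, if_false, if_pos]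
      congr 2
    · rw [Bool.not_eq_true] at h2
      by_cases h3 : PySem.Str.startswith url "postgresql+psycopg3://" = true
      · have hne : url ≠ "" := by
          intro he; rw [he] at h3; revert h3; decide
        rw [pvPosB url "postgresql+psycopg3" (by decide) (by decide)
              (by rw [show ("postgresql+psycopg3" ++ "://" : String) = "postgresql+psycopg3://" from rfl]; exact h3)]
        unfold normalize_db_url_py
        rw [if_neg hne]
        simp only [pvPrefixesA, pvLoopA, h1, h2, h3, Bool.false_eq_true, if_false, if_pos]
        congr 2
      · rw [Bool.not_eq_true] at h3
        by_cases h4 : PySem.Str.startswith url "postgres+psycopg2://" = true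
        · have hne : url ≠ "" := by
            intro he; rw [he] at h4; revert h4; decide
          rw [pvPosB url "postgres+psycopg2" (by decide) (by decide)
                (by rw [show ("postgres+psycopg2" ++ "://" : String) = "postgres+psycopg2://" from rfl]; exact h4)]
          unfold normalize_db_url_py
          rw [if_neg hne]
          simp only [pvPrefixesA, pvLoopA, h1, h2, h3, h4, Bool.false_eq_true, if_false, if_pos]
          congr 2
        · rw [Bool.not_eq_true] at h4
          by_cases h5 : PySem.Str.startswith url "postgres+psycopg://" = true
          · have hne : url ≠ "" := by
              intro he; rw [he] at h5; revert h5; decide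
            rw [pvPosB url "postgres+psycopg" (by decide) (by decide)
                  (by rw [show ("postgres+psycopg" ++ "://" : String) = "postgres+psycopg://" from rfl]; exact h5)]
            unfold normalize_db_url_py
            rw [if_neg hne]
            simp only [pvPrefixesA, pvLoopA, h1, h2, h3, h4, h5, Bool.false_eq_true, if_false, if_pos]
            congr 2
          · rw [Bool.not_eq_true] at h5
            by_cases h6 : PySem.Str.startswith url "postgres+psycopg3://" = true
            · have hne : url ≠ "" := by
                intro he; rw [he] at h6; revert h6; decide
              rw [pvPosB url "postgres+psycopg3" (by decide) (by decide)
                    (by rw [show ("postgres+psycopg3" ++ "://" : String) = "postgres+psycopg3://" from rfl]; exact h6)]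
              unfold normalize_db_url_py
              rw [if_neg hne]
              simp only [pvPrefixesA, pvLoopA, h1, h2, h3, h4, h5, h6, Bool.false_eq_true, if_false, if_pos]
              congr 2
            · rw [Bool.not_eq_true] at h6
              -- no prefix matches: both sides return url unchanged
              have hA : normalize_db_url_py url = url := by
                unfold normalize_db_url_py
                split
                · rfl
                · simp only [pvPrefixesA, pvLoopA, h1, h2, h3, h4, h5, h6, Bool.false_eq_true, if_false]
              rw [hA]
              unfold normalize_db_url_py_alt
              by_cases hf : PySem.Str.find url "://" = -1
              · simp only [hf]
                norm_num
              · have hfg : PySem.Str.find url "://" = PySem.Chars.find url.toList [':', '/', '/'] := by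
                  simp [PySem.Str.find_eq]
                have hnn : 0 ≤ PySem.Chars.find url.toList [':', '/', '/'] := by
                  have hge : -1 ≤ PySem.Chars.find url.toList [':', '/', '/'] :=
                    PySem.Chars.neg_one_le_find _ _
                  rw [hfg] at hf
                  omega
                obtain ⟨hpref, _⟩ := PySem.Chars.find_spec (s := url.toList) (sub := [':', '/', '/']) hnn
                by_cases hm : PySem.Set.contains pvSchemes
                    (PySem.Str.slice url none (some (PySem.Str.find url "://"))) = true
                · exfalso
                  have htake : url.toList.take (PySem.Chars.find url.toList [':', '/', '/']).toNat =
                      (PySem.Str.slice url none (some (PySem.Str.find url "://"))).toList := by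
                    rw [PySem.Str.toList_slice, hfg]
                    simp [PySem.List.slice_to _ hnn]
                  rcases pvSchemes_cases _ hm with hs | hs | hs | hs | hs | hs <;>
                    rw [hs] at htake
                  · exact absurd (pvStartswith_of_scheme url "postgresql+psycopg2" _ htake hpref)
                      (by rw [show ("postgresql+psycopg2" ++ "://" : String) = "postgresql+psycopg2://" from rfl, h1]; decide)
                  · exact absurd (pvStartswith_of_scheme url "postgresql+psycopg" _ htake hpref)
                      (by rw [show ("postgresql+psycopg" ++ "://" : String) = "postgresql+psycopg://" from rfl, h2]; decide)
                  · exact absurd (pvStartswith_of_scheme url "postgresql+psycopg3" _ htake hpref)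
                      (by rw [show ("postgresql+psycopg3" ++ "://" : String) = "postgresql+psycopg3://" from rfl, h3]; decide)
                  · exact absurd (pvStartswith_of_scheme url "postgres+psycopg2" _ htake hpref)
                      (by rw [show ("postgres+psycopg2" ++ "://" : String) = "postgres+psycopg2://" from rfl, h4]; decide)
                  · exact absurd (pvStartswith_of_scheme url "postgres+psycopg" _ htake hpref)
                      (by rw [show ("postgres+psycopg" ++ "://" : String) = "postgres+psycopg://" from rfl, h5]; decide)
                  · exact absurd (pvStartswith_of_scheme url "postgres+psycopg3" _ htake hpref)
                      (by rw [show ("postgres+psycopg3" ++ "://" : String) = "postgres+psycopg3://" from rfl, h6]; decide)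
                · rw [Bool.not_eq_true] at hm
                  simp only [hm, Bool.false_eq_true, if_false]
                  split <;> rfl

-- ===== VERDICT (by name: the statement is the Claim_ definition above) =====
theorem normalize_db_url_py_spec : Claim_equal_normalize_db_url_py := by
  intro url _
  unfold Spec_normalize_db_url_py
  exact pvMain url
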